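-- pv_equiv track=rewrite | github.com/ShiNera01/Algorithm | 프로그래머스_위클리 챌린지/8주차.py | solution
-- ===== SOURCE A (Python) =====
-- def solution(sizes):
--     answer = 0
--
--     max_garo = 0
--     max_sero = 0
--     temp = 0
--
--     for i in range(len(sizes)):
--         if sizes[i][0] < sizes[i][1]:
--             temp = sizes[i][1]
--             sizes[i][1] = sizes[i][0]
--             sizes[i][0] = temp
--
--         if sizes[i][0] > max_garo:
--             max_garo = sizes[i][0]
--
--         if sizes[i][1] > max_sero:
--             max_sero = sizes[i][1]
--
--
--     answer = max_garo * max_sero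
--
--     return answer
-- ===== SOURCE B (Python) =====
-- def solution(sizes):
--     # Divide-and-conquer max reduction; does NOT mutate sizes (A swaps card
--     # entries in place; the equivalence claimed is about the return value).
--     def rect(lo, hi):
--         # (largest long side, largest short side) over sizes[lo:hi]
--         if hi <= lo:
--             return (0, 0)
--         if hi == lo + 1:
--             w, h = sizes[lo][0], sizes[lo][1]
--             return (max(w, h), min(w, h))
--         mid = (lo + hi) // 2
--         g1, s1 = rect(lo, mid)
--         g2, s2 = rect(mid, hi)
--         return (max(g1, g2), max(s1, s2))
--     g, s = rect(0, len(sizes))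
--     # A starts both maxima at 0, so the bounding sides are at least 0
--     return max(g, 0) * max(s, 0)
-- ===== Notes on version B (the rewrite author's own statement) =====
-- stated objective: alternative
-- what changed: A's single fused left-to-right loop with running max accumulators and an in-place swap is replaced by a recursive divide-and-conquer reduction that splits the index range in half, computes (long,short) per card at the leaves, and merges halves with pairwise max; B does not mutate sizes.
import Mathlib
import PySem

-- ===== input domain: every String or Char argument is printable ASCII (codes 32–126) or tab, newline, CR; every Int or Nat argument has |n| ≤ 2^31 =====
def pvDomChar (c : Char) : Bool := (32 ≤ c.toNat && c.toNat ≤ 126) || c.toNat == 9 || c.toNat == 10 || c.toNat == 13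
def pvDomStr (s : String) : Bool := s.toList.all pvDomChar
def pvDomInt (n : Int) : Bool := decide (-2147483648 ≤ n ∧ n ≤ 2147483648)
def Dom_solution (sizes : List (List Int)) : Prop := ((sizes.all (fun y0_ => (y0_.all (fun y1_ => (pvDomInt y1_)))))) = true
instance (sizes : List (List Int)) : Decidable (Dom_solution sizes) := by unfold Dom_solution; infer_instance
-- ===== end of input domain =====

-- B replaces A's fused accumulator loop by a divide-and-conquer max reduction; A swaps
-- card entries in place, B does not mutate — the equivalence is about the return value.

-- ===== PORT A =====
-- A's fused loop body: swap to larger-first, then bump max_garo / max_sero.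
def solutionStepA (s : Int × Int) (c : List Int) : Int × Int :=
  let a := ((PySem.List.pyGet? c 0).getD 0)
  let b := ((PySem.List.pyGet? c 1).getD 0)
  let x := if a < b then b else a
  let y := if a < b then a else b
  (if x > s.1 then x else s.1, if y > s.2 then y else s.2)

def solution (sizes : List (List Int)) : Int :=
  let r := sizes.foldl solutionStepA (0, 0)
  r.1 * r.2

-- ===== PORT B =====
-- B's recursive helper rect(lo, hi): (largest long side, largest short side) over sizes[lo:hi]
def solutionRect (sizes : List (List Int)) (lo hi : Nat) : Int × Int :=
  if _h0 : hi ≤ lo then (0, 0)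
  else if _h1 : hi = lo + 1 then
    let c := ((PySem.List.pyGet? sizes (Int.ofNat lo)).getD [])
    let w := ((PySem.List.pyGet? c 0).getD 0)
    let h := ((PySem.List.pyGet? c 1).getD 0)
    (max w h, min w h)
  else
    let p := solutionRect sizes lo ((lo + hi) / 2)
    let q := solutionRect sizes ((lo + hi) / 2) hi
    (max p.1 q.1, max p.2 q.2)
termination_by hi - lo
decreasing_by all_goals omega

def solution_alt (sizes : List (List Int)) : Int :=
  let r := solutionRect sizes 0 sizes.length
  (max r.1 0) * (max r.2 0)

-- ===== PRECONDITION & SPEC =====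
-- Pre_ excludes exactly the inputs where A (and B) raise IndexError: a card with fewer than two entries.
def Pre_solution (sizes : List (List Int)) : Prop := ∀ c ∈ sizes, 2 ≤ c.length
instance (sizes : List (List Int)) : Decidable (Pre_solution sizes) := by unfold Pre_solution; infer_instance
def pvWitness_solution : List (List Int) := [[1, 2], [4, 3]]

def Spec_solution (sizes : List (List Int)) (out : Int) : Prop := out = solution_alt sizes
instance (sizes : List (List Int)) (out : Int) : Decidable (Spec_solution sizes out) := by unfold Spec_solution; infer_instance

-- ===== CLAIM (what is proved, stated in full; the proofs are below) =====
def Claim_equal_solution : Prop := ∀ (sizes : List (List Int)), Dom_solution sizes → Pre_solution sizes → Spec_solution sizes (solution sizes)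

-- ===== LEMMAS AND PROOFS =====

-- per-card long and short side, as both ports read them
def pvBig (c : List Int) : Int := max ((PySem.List.pyGet? c 0).getD 0) ((PySem.List.pyGet? c 1).getD 0)
def pvSmall (c : List Int) : Int := min ((PySem.List.pyGet? c 0).getD 0) ((PySem.List.pyGet? c 1).getD 0)

-- "V l": max of long sides and max of short sides over l, both clamped by 0
def pvV (l : List (List Int)) : Int × Int :=
  ((l.map pvBig).foldl max 0, (l.map pvSmall).foldl max 0)

lemma stepA_max (g s : Int) (c : List Int) :
    solutionStepA (g, s) c = (max g (pvBig c), max s (pvSmall c)) := by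
  simp only [solutionStepA, pvBig, pvSmall]
  split_ifs <;> simp_all <;> omega

lemma foldA_eq (l : List (List Int)) : ∀ g s : Int,
    l.foldl solutionStepA (g, s) = ((l.map pvBig).foldl max g, (l.map pvSmall).foldl max s) := by
  induction l with
  | nil => intro g s; simp
  | cons c cs ih => intro g s; simp only [List.foldl, List.map]; rw [stepA_max, ih]

lemma foldl_max_pull (l : List Int) : ∀ a b : Int,
    l.foldl max (max a b) = max a (l.foldl max b) := by
  induction l with
  | nil => intro a b; rfl
  | cons x l ih =>
      intro a b
      simp only [List.foldl]
      rw [max_assoc, ih]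

lemma init_le_foldl_max (l : List Int) : ∀ a : Int, a ≤ l.foldl max a := by
  induction l with
  | nil => intro a; simp
  | cons x l ih => intro a; exact le_trans (le_max_left a x) (ih (max a x))

lemma foldl_max_nonneg_init (ys : List Int) (a : Int) (h : 0 ≤ a) :
    ys.foldl max a = max a (ys.foldl max 0) := by
  rw [← foldl_max_pull]
  congr 1
  omega

lemma pvV_append (l1 l2 : List (List Int)) :
    pvV (l1 ++ l2) = (max (pvV l1).1 (pvV l2).1, max (pvV l1).2 (pvV l2).2) := by
  simp only [pvV, List.map_append, List.foldl_append, Prod.mk.injEq]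
  exact ⟨foldl_max_nonneg_init _ _ (init_le_foldl_max _ 0),
         foldl_max_nonneg_init _ _ (init_le_foldl_max _ 0)⟩

lemma seg_split (sizes : List (List Int)) (lo mid hi : Nat) (h1 : lo ≤ mid) (h2 : mid ≤ hi) :
    (sizes.drop lo).take (hi - lo) =
      (sizes.drop lo).take (mid - lo) ++ (sizes.drop mid).take (hi - mid) := by
  rw [show hi - lo = (mid - lo) + (hi - mid) by omega, List.take_add]
  congr 2
  rw [List.drop_drop]
  congr 1
  omega

lemma rect_eq (sizes : List (List Int)) : ∀ n lo hi, hi - lo ≤ n → hi ≤ sizes.length →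
    (max (solutionRect sizes lo hi).1 0, max (solutionRect sizes lo hi).2 0)
      = pvV ((sizes.drop lo).take (hi - lo)) := by
  intro n
  induction n with
  | zero =>
      intro lo hi hn hlen
      rw [solutionRect]
      rw [dif_pos (show hi ≤ lo by omega)]
      simp [show hi - lo = 0 by omega, pvV]
  | succ n ih =>
      intro lo hi hn hlen
      rw [solutionRect]
      by_cases h0 : hi ≤ lo
      · rw [dif_pos h0]
        simp [show hi - lo = 0 by omega, pvV]
      · by_cases h1 : hi = lo + 1
        · have hlt : lo < sizes.length := by omega
          subst h1
          rw [dif_neg (by omega : ¬ (lo + 1 ≤ lo)), dif_pos rfl]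
          have hseg : (sizes.drop lo).take (lo + 1 - lo) = [sizes[lo]] := by
            simp only [show lo + 1 - lo = 1 by omega]
            rw [List.take_one, List.head?_drop]
            simp only [List.getElem?_eq_getElem hlt, Option.toList_some]
            rfl
          rw [hseg]
          have hget : (PySem.List.pyGet? sizes (Int.ofNat lo)).getD [] = sizes[lo] := by
            simp only [PySem.List.pyGet?, PySem.List.pyIdx?]
            norm_num [hlt]
            rfl
          simp only [pvV, List.map, List.foldl, hget, pvBig, pvSmall, Prod.mk.injEq]
          constructor <;> omega
        · rw [dif_neg h0, dif_neg h1]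
          have hm1 : lo < (lo + hi) / 2 := by omega
          have hm2 : (lo + hi) / 2 < hi := by omega
          rw [seg_split sizes lo ((lo + hi) / 2) hi (by omega) (by omega), pvV_append,
              ← ih lo ((lo + hi) / 2) (by omega) (by omega),
              ← ih ((lo + hi) / 2) hi (by omega) hlen]
          simp only [Prod.mk.injEq]
          constructor <;> omega

-- ===== VERDICT (by name: the statement is the Claim_ definition above) =====
theorem solution_spec : Claim_equal_solution := by
  intro sizes _ _
  show solution sizes = solution_alt sizes
  have h := rect_eq sizes sizes.length 0 sizes.length (by omega) (le_refl _)
  simp only [Nat.sub_zero, List.drop_zero, List.take_length] at h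
  simp only [solution, solution_alt, foldA_eq]
  have h1 := congrArg Prod.fst h
  have h2 := congrArg Prod.snd h
  simp only [pvV] at h1 h2
  rw [← h1, ← h2]
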